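-- pv_equiv track=rewrite | github.com/marianoapp/kOS-compress | dictionary.py | remove_fully_overlapping
-- ===== SOURCE A (Python) =====
-- def remove_fully_overlapping(seqs):
--     # sort by sequence length, longest first
--     sorted_seqs = sorted([[k, len(v)] for k, v, _ in seqs], key=lambda x: len(x[0]), reverse=True)
--     longer_seqs = []
--     seqs_remove = []
--     # TODO: assign better variable names
--     for k, length in sorted_seqs:
--         for a, b in longer_seqs:
--             if k in a and length == b:
--                 seqs_remove.append(k)
--                 break
--         longer_seqs.append([k, length])
--     seqs = [seq for seq in seqs if seq[0] not in seqs_remove]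
--     return seqs
-- ===== SOURCE B (Python) =====
-- def remove_fully_overlapping(seqs):
--     # group keys by the length of their value; containment is only ever
--     # checked between entries with equal value length, so no sorting is needed
--     groups = {}
--     for k, v, _ in seqs:
--         groups.setdefault(len(v), []).append(k)
--     remove = set()
--     for keys in groups.values():
--         for i, k in enumerate(keys):
--             if any(j != i and k in a for j, a in enumerate(keys)):
--                 remove.add(k)
--     return [seq for seq in seqs if seq[0] not in remove]
-- ===== Notes on version B (the rewrite author's own statement) =====
-- stated objective: alternative
-- what changed: Instead of sorting all keys by length and scanning an ever-growing prefix list for a containing key, B buckets the keys by value length in one dict pass and does a symmetric containment check only inside each bucket (no sort, no incremental prefix state), collecting removed keys in a set.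
import Mathlib
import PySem

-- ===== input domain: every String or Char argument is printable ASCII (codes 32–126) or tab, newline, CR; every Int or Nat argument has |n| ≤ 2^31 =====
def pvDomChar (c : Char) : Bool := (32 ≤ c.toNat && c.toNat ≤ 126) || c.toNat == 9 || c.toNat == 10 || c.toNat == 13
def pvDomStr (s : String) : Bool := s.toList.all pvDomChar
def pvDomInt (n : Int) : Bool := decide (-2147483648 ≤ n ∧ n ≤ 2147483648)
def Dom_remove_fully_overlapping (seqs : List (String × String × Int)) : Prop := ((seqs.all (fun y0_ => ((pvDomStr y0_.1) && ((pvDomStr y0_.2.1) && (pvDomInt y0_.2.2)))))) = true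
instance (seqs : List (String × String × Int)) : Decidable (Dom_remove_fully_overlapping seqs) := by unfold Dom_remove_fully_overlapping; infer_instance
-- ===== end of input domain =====

-- B buckets the keys by value length in one dict pass instead of sorting by key length and
-- rescanning a growing prefix list; same return value, proved equal below.

-- ===== PORT A =====
-- one step of A's main loop: state = (longer_seqs, seqs_remove); the inner 'for … break' is an any-check
def pvStepA (st : List (String × Int) × List String) (kl : String × Int) :
    List (String × Int) × List String :=
  (st.1 ++ [kl],
   if st.1.any (fun ab => PySem.Str.isIn kl.1 ab.1 && (kl.2 == ab.2)) then st.2 ++ [kl.1] else st.2)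

def remove_fully_overlapping (seqs : List (String × String × Int)) : List (String × String × Int) :=
  let sorted_seqs := PySem.List.sorted (seqs.map (fun s => (s.1, PySem.Str.len s.2.1)))
      (fun x => PySem.Str.len x.1) true
  let st := sorted_seqs.foldl pvStepA ([], [])
  seqs.filter (fun s => !(st.2.contains s.1))

-- ===== PORT B =====
def remove_fully_overlapping_alt (seqs : List (String × String × Int)) : List (String × String × Int) :=
  let groups := seqs.foldl (fun d s => d.modify (PySem.Str.len s.2.1) [] (fun l => l ++ [s.1]))
      (PySem.Dict.empty : PySem.Dict Int (List String))
  let rem := groups.values.foldl (fun r keys =>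
      (PySem.List.enumerate keys).foldl (fun r ik =>
        if (PySem.List.enumerate keys).any (fun ja => decide (ja.1 ≠ ik.1) && PySem.Str.isIn ik.2 ja.2)
        then PySem.Set.add r ik.2 else r) r)
    (PySem.Set.empty : PySem.Set String)
  seqs.filter (fun s => !(PySem.Set.contains rem s.1))

-- ===== PRECONDITION & SPEC =====
def Spec_remove_fully_overlapping (seqs : List (String × String × Int)) (out : List (String × String × Int)) : Prop := out = remove_fully_overlapping_alt seqs
instance (seqs : List (String × String × Int)) (out : List (String × String × Int)) : Decidable (Spec_remove_fully_overlapping seqs out) := by unfold Spec_remove_fully_overlapping; infer_instance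

-- ===== CLAIM (what is proved, stated in full; the proofs are below) =====
def Claim_equal_remove_fully_overlapping : Prop := ∀ (seqs : List (String × String × Int)), Dom_remove_fully_overlapping seqs → Spec_remove_fully_overlapping seqs (remove_fully_overlapping seqs)

-- ===== LEMMAS AND PROOFS =====

-- the (key, len(value)) projection of the input, and the bucket of keys with value length L
def pvItems (seqs : List (String × String × Int)) : List (String × Int) :=
  seqs.map (fun s => (s.1, PySem.Str.len s.2.1))

def pvGrp (seqs : List (String × String × Int)) (L : Int) : List String :=
  ((pvItems seqs).filter (fun p => p.2 == L)).map (fun p => p.1)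

-- the common characterisation: key x is removed iff for some value length L of an entry with key x
-- there is either a DIFFERENT key containing x with value length L, or a duplicate (x, L) entry
def pvFlag (seqs : List (String × String × Int)) (x : String) : Prop :=
  ∃ L, ((x, L) ∈ pvItems seqs ∧ ∃ q ∈ pvItems seqs, q.2 = L ∧ q.1 ≠ x ∧ PySem.Str.isIn x q.1 = true)
     ∨ 2 ≤ (pvItems seqs).count (x, L)

-- generic counting helpers (count under an arbitrary lawful BEq instance)
theorem pv_count_beq_eq {α : Type} [BEq α] [LawfulBEq α] (l : List α) (x : α) :
    l.count x = @List.count α (@instBEqOfDecidableEq α (@instDecidableEqOfLawfulBEq α _ _)) x l := by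
  induction l with
  | nil => rfl
  | cons a t ih =>
    by_cases hax : a = x
    · simp [ih, hax]
    · simp [ih, hax]

theorem pv_two_le_count_of_ne_getElem {α : Type} [BEq α] [LawfulBEq α] (g : List α) (x : α)
    (i j : Nat) (hi : i < g.length) (hj : j < g.length) (hij : i ≠ j)
    (h1 : g[i] = x) (h2 : g[j] = x) : 2 ≤ g.count x := by
  rw [pv_count_beq_eq, ← @List.duplicate_iff_two_le_count α g x (@instDecidableEqOfLawfulBEq α _ _),
    List.duplicate_iff_exists_distinct_get]
  rcases Nat.lt_or_ge i j with h | h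
  · exact ⟨⟨i, hi⟩, ⟨j, hj⟩, h, by simp [h1], by simp [h2]⟩
  · exact ⟨⟨j, hj⟩, ⟨i, hi⟩, Nat.lt_of_le_of_ne h (Ne.symm hij), by simp [h2], by simp [h1]⟩

theorem pv_count_to_getElem {α : Type} [BEq α] [LawfulBEq α] (g : List α) (x : α) (h : 2 ≤ g.count x) :
    ∃ (i j : Nat) (hi : i < g.length) (hj : j < g.length), i ≠ j ∧ g[i] = x ∧ g[j] = x := by
  rw [pv_count_beq_eq, ← @List.duplicate_iff_two_le_count α g x (@instDecidableEqOfLawfulBEq α _ _),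
    List.duplicate_iff_exists_distinct_get] at h
  rcases h with ⟨n, m, hnm, h1, h2⟩
  exact ⟨n.1, m.1, n.2, m.2, by omega, by simpa using h1.symm, by simpa using h2.symm⟩

theorem pv_isIn_self (x : String) : PySem.Str.isIn x x = true := by
  rw [PySem.Str.isIn_iff_infix]

-- ---------- A side ----------

theorem pv_foldA (l : List (String × Int)) (acc : List (String × Int)) (rem : List String) (x : String) :
    x ∈ (l.foldl pvStepA (acc, rem)).2 ↔
      x ∈ rem ∨ ∃ pre kl suf, l = pre ++ kl :: suf ∧ kl.1 = x ∧
        ∃ ab ∈ acc ++ pre, PySem.Str.isIn kl.1 ab.1 = true ∧ kl.2 = ab.2 := by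
  induction l generalizing acc rem with
  | nil =>
    simp only [List.foldl_nil]
    constructor
    · exact fun h => Or.inl h
    · rintro (h | ⟨pre, kl, suf, habs, _⟩)
      · exact h
      · exact absurd habs (by simp)
  | cons kl0 t ih =>
    rw [List.foldl_cons]
    show x ∈ (t.foldl pvStepA (pvStepA (acc, rem) kl0)).2 ↔ _
    have hstep : pvStepA (acc, rem) kl0 = (acc ++ [kl0],
        if acc.any (fun ab => PySem.Str.isIn kl0.1 ab.1 && (kl0.2 == ab.2)) then rem ++ [kl0.1] else rem) := rfl
    rw [hstep, ih]
    have hrem' : x ∈ (if acc.any (fun ab => PySem.Str.isIn kl0.1 ab.1 && (kl0.2 == ab.2)) then rem ++ [kl0.1] else rem)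
        ↔ x ∈ rem ∨ (kl0.1 = x ∧ ∃ ab ∈ acc, PySem.Str.isIn kl0.1 ab.1 = true ∧ kl0.2 = ab.2) := by
      by_cases hc : acc.any (fun ab => PySem.Str.isIn kl0.1 ab.1 && (kl0.2 == ab.2)) = true
      · rw [if_pos hc]
        rw [List.any_eq_true] at hc
        rcases hc with ⟨ab, hab, habc⟩
        simp only [Bool.and_eq_true, beq_iff_eq] at habc
        simp only [List.mem_append, List.mem_singleton]
        constructor
        · rintro (h | rfl)
          · exact Or.inl h
          · exact Or.inr ⟨rfl, ab, hab, habc.1, habc.2⟩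
        · rintro (h | ⟨hx, _⟩)
          · exact Or.inl h
          · exact Or.inr hx.symm
      · rw [if_neg hc]
        simp only [List.any_eq_true, Bool.and_eq_true, beq_iff_eq] at hc
        push Not at hc
        constructor
        · exact Or.inl
        · rintro (h | ⟨rfl, ab, hab, hin, he⟩)
          · exact h
          · exact absurd hin (by simpa [he] using hc ab hab)
    rw [hrem']
    constructor
    · rintro ((h | ⟨rfl, ab, hab, hin, he⟩) | ⟨pre, kl, suf, rfl, hx, ab, hab, hin, he⟩)
      · exact Or.inl h
      · exact Or.inr ⟨[], kl0, t, by simp, rfl, ab, by simpa using hab, hin, he⟩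
      · refine Or.inr ⟨kl0 :: pre, kl, suf, by simp, hx, ab, ?_, hin, he⟩
        simpa [List.append_assoc] using hab
    · rintro (h | ⟨pre, kl, suf, hsplit, hx, ab, hab, hin, he⟩)
      · exact Or.inl (Or.inl h)
      · cases pre with
        | nil =>
          simp only [List.nil_append, List.cons.injEq] at hsplit
          rcases hsplit with ⟨rfl, rfl⟩
          exact Or.inl (Or.inr ⟨hx, ab, by simpa using hab, hin, he⟩)
        | cons p pre' =>
          simp only [List.cons_append, List.cons.injEq] at hsplit
          rcases hsplit with ⟨rfl, rfl⟩
          refine Or.inr ⟨pre', kl, suf, rfl, hx, ab, ?_, hin, he⟩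
          simpa [List.append_assoc] using hab

theorem pv_split_iff_flag (seqs : List (String × String × Int)) (x : String) :
    (∃ pre kl suf,
        PySem.List.sorted (pvItems seqs) (fun p => PySem.Str.len p.1) true = pre ++ kl :: suf ∧
        kl.1 = x ∧ ∃ ab ∈ pre, PySem.Str.isIn kl.1 ab.1 = true ∧ kl.2 = ab.2)
      ↔ pvFlag seqs x := by
  set S := PySem.List.sorted (pvItems seqs) (fun p => PySem.Str.len p.1) true with hS
  have hperm : S.Perm (pvItems seqs) := PySem.List.sorted_perm _ _ _
  constructor
  · rintro ⟨pre, kl, suf, hsplit, hx, ab, hab, hin, he⟩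
    have hklS : kl ∈ S := by rw [hsplit]; simp
    have habS : ab ∈ S := by rw [hsplit]; simp [hab]
    have hklI : (x, kl.2) ∈ pvItems seqs := by
      have := hperm.mem_iff.mp hklS
      rwa [show kl = (x, kl.2) from by cases kl; simp_all] at this
    by_cases hab1 : ab.1 = x
    · -- the containing earlier entry is the same (key, length) pair: a duplicate
      have habkl : ab = kl := by cases ab; cases kl; simp_all
      have hklx : kl = (x, kl.2) := by cases kl; simp_all
      refine ⟨kl.2, Or.inr ?_⟩
      rw [← hperm.count_eq, hsplit, ← hklx]
      have h1 : 0 < pre.count kl := List.count_pos_iff.mpr (habkl ▸ hab)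
      simp only [List.count_append, List.count_cons_self]
      omega
    · exact ⟨kl.2, Or.inl ⟨hklI, ab, hperm.mem_iff.mp habS, he.symm, hab1, hx ▸ hin⟩⟩
  · intro hflag
    have hpw := PySem.List.sorted_pairwise_rev (pvItems seqs) (fun p => PySem.Str.len p.1)
    rw [← hS] at hpw
    rw [List.pairwise_iff_getElem] at hpw
    have build : ∀ (iq ip : Nat) (hq : iq < S.length) (hp : ip < S.length), iq < ip →
        S[ip].1 = x → PySem.Str.isIn x S[iq].1 = true → S[ip].2 = S[iq].2 →
        ∃ pre kl suf, S = pre ++ kl :: suf ∧ kl.1 = x ∧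
          ∃ ab ∈ pre, PySem.Str.isIn kl.1 ab.1 = true ∧ kl.2 = ab.2 := by
      intro iq ip hq hp hlt h1 h2 h3
      refine ⟨S.take ip, S[ip], S.drop (ip + 1), ?_, h1, S[iq], ?_, h1 ▸ h2, h3⟩
      · conv_lhs => rw [← List.take_append_drop ip S]
        rw [List.drop_eq_getElem_cons hp]
      · rw [List.mem_take_iff_getElem]
        exact ⟨iq, by omega, rfl⟩
    rcases hflag with ⟨L, ⟨hmem, q, hqI, hq2, hq1, hin⟩ | hcnt⟩
    · rcases List.mem_iff_getElem.mp (hperm.mem_iff.mpr hmem) with ⟨ip, hp, hSp⟩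
      rcases List.mem_iff_getElem.mp (hperm.mem_iff.mpr hqI) with ⟨iq, hq', hSq⟩
      have hinfix : x.toList <:+: q.1.toList := (PySem.Str.isIn_iff_infix _ _).mp hin
      have hlen : x.toList.length ≤ q.1.toList.length := hinfix.length_le
      have hne : x.toList.length ≠ q.1.toList.length := by
        intro h
        exact hq1 (String.toList_inj.mp (hinfix.eq_of_length h)).symm
      have hlt : iq < ip := by
        rcases Nat.lt_trichotomy iq ip with h | h | h
        · exact h
        · exfalso
          subst h
          rw [hSp] at hSq
          exact hq1 (congrArg Prod.fst hSq).symm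
        · exfalso
          have := hpw ip iq hp hq' h
          rw [hSp, hSq] at this
          simp only [PySem.Str.len_eq] at this
          omega
      exact build iq ip hq' hp hlt (by rw [hSp]) (by rw [hSq]; exact hin) (by rw [hSp, hSq, hq2])
    · have hcntS : 2 ≤ S.count (x, L) := by rw [hperm.count_eq]; exact hcnt
      rcases pv_count_to_getElem S (x, L) hcntS with ⟨i, j, hi, hj, hij, h1, h2⟩
      rcases Nat.lt_or_ge i j with h | h
      · exact build i j hi hj h (by rw [h2]) (by rw [h1]; exact pv_isIn_self x) (by rw [h1, h2])
      · have h' : j < i := by omega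
        exact build j i hj hi h' (by rw [h1]) (by rw [h2]; exact pv_isIn_self x) (by rw [h1, h2])

theorem memA_iff_flag (seqs : List (String × String × Int)) (x : String) :
    x ∈ ((PySem.List.sorted (pvItems seqs) (fun p => PySem.Str.len p.1) true).foldl pvStepA ([], [])).2
      ↔ pvFlag seqs x := by
  rw [pv_foldA]
  rw [← pv_split_iff_flag seqs x]
  simp only [List.nil_append, List.not_mem_nil, false_or]

-- ---------- B side ----------

theorem pv_mem_grp (seqs : List (String × String × Int)) (L : Int) (x : String) :
    x ∈ pvGrp seqs L ↔ (x, L) ∈ pvItems seqs := by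
  simp only [pvGrp, List.mem_map, List.mem_filter, beq_iff_eq]
  constructor
  · rintro ⟨p, ⟨hp, h2⟩, rfl⟩
    have : p = (p.1, L) := by cases p; simp_all
    exact this ▸ hp
  · intro h
    exact ⟨(x, L), ⟨h, rfl⟩, rfl⟩

theorem pv_count_grp (seqs : List (String × String × Int)) (L : Int) (x : String) :
    (pvGrp seqs L).count x = (pvItems seqs).count (x, L) := by
  unfold pvGrp
  generalize (pvItems seqs) = l
  induction l with
  | nil => simp
  | cons p t ih =>
    by_cases h2 : p.2 = L
    · by_cases h1 : p.1 = x
      · have : p = (x, L) := by cases p; simp_all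
        simp [this, ih]
      · have : p ≠ (x, L) := by intro h; cases p; simp_all
        simp [h2, h1, this, ih]
    · have : p ≠ (x, L) := by intro h; cases p; simp_all
      simp [h2, this, ih]

theorem pv_mem_lens (seqs : List (String × String × Int)) (x : String) (L : Int)
    (h : (x, L) ∈ pvItems seqs) :
    L ∈ PySem.Set.ofList (seqs.map (fun s => PySem.Str.len s.2.1)) := by
  rw [PySem.Set.mem_ofList]
  simp only [pvItems, List.mem_map] at h ⊢
  rcases h with ⟨s, hs, he⟩
  exact ⟨s, hs, congrArg Prod.snd he⟩

theorem pv_getD_groups (seqs : List (String × String × Int)) (L : Int) :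
    (seqs.foldl (fun d s => d.modify (PySem.Str.len s.2.1) [] (fun l => l ++ [s.1]))
        (PySem.Dict.empty : PySem.Dict Int (List String))).getD L [] = pvGrp seqs L := by
  have h : seqs.foldl (fun d s => d.modify (PySem.Str.len s.2.1) [] (fun l => l ++ [s.1]))
        (PySem.Dict.empty : PySem.Dict Int (List String))
      = (seqs.map (fun s => (PySem.Str.len s.2.1, s.1))).foldl
          (fun d p => d.modify p.1 [] (fun l => l ++ [p.2])) PySem.Dict.empty := by
    rw [List.foldl_map]
  rw [h, PySem.Dict.getD_foldl_modify_append]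
  simp [pvGrp, pvItems, List.filter_map, List.map_map, Function.comp_def]

theorem pv_nodup_keys_groups (seqs : List (String × String × Int)) :
    (seqs.foldl (fun d s => d.modify (PySem.Str.len s.2.1) [] (fun l => l ++ [s.1]))
        (PySem.Dict.empty : PySem.Dict Int (List String))).keys.Nodup := by
  exact PySem.Dict.nodup_keys_foldl_modify_key seqs (fun s => PySem.Str.len s.2.1) []
      (fun _ s l => l ++ [s.1]) PySem.Dict.empty (by simp)

theorem pv_keys_groups (seqs : List (String × String × Int)) :
    (seqs.foldl (fun d s => d.modify (PySem.Str.len s.2.1) [] (fun l => l ++ [s.1]))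
        (PySem.Dict.empty : PySem.Dict Int (List String))).keys
      = PySem.Set.ofList (seqs.map (fun s => PySem.Str.len s.2.1)) := by
  rw [PySem.Dict.keys_foldl_modify_key seqs (fun s => PySem.Str.len s.2.1) []
      (fun _ s l => l ++ [s.1]) PySem.Dict.empty]
  rfl

theorem pv_values_groups (seqs : List (String × String × Int)) :
    (seqs.foldl (fun d s => d.modify (PySem.Str.len s.2.1) [] (fun l => l ++ [s.1]))
        (PySem.Dict.empty : PySem.Dict Int (List String))).values
      = (PySem.Set.ofList (seqs.map (fun s => PySem.Str.len s.2.1))).map (fun L => pvGrp seqs L) := by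
  rw [PySem.Dict.values_eq_map_keys _ (pv_nodup_keys_groups seqs) [], pv_keys_groups]
  exact List.map_congr_left (fun L _ => pv_getD_groups seqs L)

theorem pv_mem_foldl_add_if {β : Type} (l : List β) (P : β → Bool) (g : β → String)
    (r0 : PySem.Set String) (x : String) :
    x ∈ l.foldl (fun r b => if P b then PySem.Set.add r (g b) else r) r0 ↔
      x ∈ r0 ∨ ∃ b ∈ l, P b ∧ g b = x := by
  induction l generalizing r0 with
  | nil => simp
  | cons b t ih =>
    simp only [List.foldl_cons, ih]
    by_cases h : P b = true
    · simp only [h, if_true, PySem.Set.mem_add]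
      constructor
      · rintro (⟨h1 | h1⟩ | h1) <;> [exact Or.inl h1; exact Or.inr ⟨b, by simp, h, h1.symm⟩; · rcases h1 with ⟨c, hc, hP, hg⟩; exact Or.inr ⟨c, by simp [hc], hP, hg⟩]
      · rintro (h1 | ⟨c, hc, hP, hg⟩)
        · exact Or.inl (Or.inl h1)
        · rcases List.mem_cons.mp hc with rfl | hc
          · exact Or.inl (Or.inr hg.symm)
          · exact Or.inr ⟨c, hc, hP, hg⟩
    · simp only [h, if_false, Bool.false_eq_true]
      constructor
      · rintro (h1 | ⟨c, hc, hP, hg⟩) <;> [exact Or.inl h1; exact Or.inr ⟨c, by simp [hc], hP, hg⟩]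
      · rintro (h1 | ⟨c, hc, hP, hg⟩)
        · exact Or.inl h1
        · rcases List.mem_cons.mp hc with rfl | hc
          · simp [hP] at h
          · exact Or.inr ⟨c, hc, hP, hg⟩

theorem pv_mem_outer (vals : List (List String)) (r0 : PySem.Set String) (x : String) :
    x ∈ vals.foldl (fun r keys =>
        (PySem.List.enumerate keys).foldl (fun r ik =>
          if ((PySem.List.enumerate keys).any fun ja => decide (ja.1 ≠ ik.1) && PySem.Str.isIn ik.2 ja.2)
          then PySem.Set.add r ik.2 else r) r) r0
      ↔ x ∈ r0 ∨ ∃ g ∈ vals, ∃ ik ∈ PySem.List.enumerate g,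
          ((PySem.List.enumerate g).any fun ja => decide (ja.1 ≠ ik.1) && PySem.Str.isIn ik.2 ja.2) = true ∧ ik.2 = x := by
  induction vals generalizing r0 with
  | nil => simp
  | cons g t ih =>
    simp only [List.foldl_cons, ih,
      pv_mem_foldl_add_if (PySem.List.enumerate g)
        (fun ik => (PySem.List.enumerate g).any fun ja => decide (ja.1 ≠ ik.1) && PySem.Str.isIn ik.2 ja.2)
        (fun ik => ik.2) r0 x]
    constructor
    · rintro ((h | h) | h)
      · exact Or.inl h
      · exact Or.inr ⟨g, by simp, h⟩
      · rcases h with ⟨g', hg', hrest⟩; exact Or.inr ⟨g', by simp [hg'], hrest⟩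
    · rintro (h | ⟨g', hg', hrest⟩)
      · exact Or.inl (Or.inl h)
      · rcases List.mem_cons.mp hg' with rfl | hg'
        · exact Or.inl (Or.inr hrest)
        · exact Or.inr ⟨g', hg', hrest⟩

theorem pv_cond_iff (g : List String) (x : String) :
    (∃ ik ∈ PySem.List.enumerate g,
        ((PySem.List.enumerate g).any (fun ja => decide (ja.1 ≠ ik.1) && PySem.Str.isIn ik.2 ja.2)) = true ∧ ik.2 = x)
      ↔ ((x ∈ g ∧ ∃ a ∈ g, a ≠ x ∧ PySem.Str.isIn x a = true) ∨ 2 ≤ g.count x) := by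
  constructor
  · rintro ⟨ik, hik, hany, hx⟩
    rw [PySem.List.mem_enumerate_iff] at hik
    rcases hik with ⟨i, hi, rfl⟩
    rw [List.any_eq_true] at hany
    rcases hany with ⟨ja, hja, hcond⟩
    rw [PySem.List.mem_enumerate_iff] at hja
    rcases hja with ⟨j, hj, rfl⟩
    simp only [Bool.and_eq_true, decide_eq_true_eq] at hcond
    rcases hcond with ⟨hne, hin⟩
    have hji : j ≠ i := by intro h; apply hne; simp [h]
    simp only at hx hin
    by_cases hgj : g[j] = x
    · exact Or.inr (pv_two_le_count_of_ne_getElem g x i j hi hj (Ne.symm hji) hx hgj)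
    · exact Or.inl ⟨hx ▸ List.getElem_mem hi, g[j], List.getElem_mem hj, hgj, hx ▸ hin⟩
  · rintro (⟨hxg, a, hag, hax, hin⟩ | hcnt)
    · rcases List.mem_iff_getElem.mp hxg with ⟨i, hi, rfl⟩
      rcases List.mem_iff_getElem.mp hag with ⟨j, hj, rfl⟩
      refine ⟨(0 + (i : Int), g[i]), ?_, ?_, rfl⟩
      · rw [PySem.List.mem_enumerate_iff]; exact ⟨i, hi, rfl⟩
      · rw [List.any_eq_true]
        refine ⟨(0 + (j : Int), g[j]), ?_, ?_⟩
        · rw [PySem.List.mem_enumerate_iff]; exact ⟨j, hj, rfl⟩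
        · simp only [Bool.and_eq_true, decide_eq_true_eq]
          constructor
          · intro h
            have : j = i := by omega
            exact hax (by simp [this])
          · exact hin
    · rcases pv_count_to_getElem g x hcnt with ⟨i, j, hi, hj, hij, h1, h2⟩
      refine ⟨(0 + (i : Int), g[i]), ?_, ?_, h1⟩
      · rw [PySem.List.mem_enumerate_iff]; exact ⟨i, hi, rfl⟩
      · rw [List.any_eq_true]
        refine ⟨(0 + (j : Int), g[j]), ?_, ?_⟩
        · rw [PySem.List.mem_enumerate_iff]; exact ⟨j, hj, rfl⟩
        · simp only [Bool.and_eq_true, decide_eq_true_eq]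
          exact ⟨by intro h; exact hij (by omega), by rw [h1, h2]; exact pv_isIn_self x⟩

theorem memB_iff_flag (seqs : List (String × String × Int)) (x : String) :
    x ∈ ((seqs.foldl (fun d s => d.modify (PySem.Str.len s.2.1) [] (fun l => l ++ [s.1]))
            (PySem.Dict.empty : PySem.Dict Int (List String))).values.foldl (fun r keys =>
        (PySem.List.enumerate keys).foldl (fun r ik =>
          if (PySem.List.enumerate keys).any (fun ja => decide (ja.1 ≠ ik.1) && PySem.Str.isIn ik.2 ja.2)
          then PySem.Set.add r ik.2 else r) r)
      (PySem.Set.empty : PySem.Set String)) ↔ pvFlag seqs x := by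
  rw [pv_values_groups, pv_mem_outer]
  constructor
  · rintro (h | ⟨g, hg, hcond⟩)
    · simp [PySem.Set.empty] at h
    · rcases List.mem_map.mp hg with ⟨L, _, rfl⟩
      rcases (pv_cond_iff (pvGrp seqs L) x).mp hcond with ⟨hxg, a, hag, hax, hin⟩ | hcnt
      · exact ⟨L, Or.inl ⟨(pv_mem_grp seqs L x).mp hxg,
          (a, L), (pv_mem_grp seqs L a).mp hag, rfl, hax, hin⟩⟩
      · exact ⟨L, Or.inr (by rw [← pv_count_grp]; exact hcnt)⟩
  · rintro ⟨L, hF⟩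
    refine Or.inr ⟨pvGrp seqs L, ?_, ?_⟩
    · refine List.mem_map.mpr ⟨L, ?_, rfl⟩
      rcases hF with ⟨hmem, _⟩ | hcnt
      · exact pv_mem_lens seqs x L hmem
      · exact pv_mem_lens seqs x L (List.count_pos_iff.mp (by omega))
    · refine (pv_cond_iff (pvGrp seqs L) x).mpr ?_
      rcases hF with ⟨hmem, q, hq, hq2, hq1, hin⟩ | hcnt
      · refine Or.inl ⟨(pv_mem_grp seqs L x).mpr hmem, q.1, ?_, hq1, hin⟩
        rw [pv_mem_grp]
        have : q = (q.1, L) := by cases q; simp_all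
        exact this ▸ hq
      · exact Or.inr (by rw [pv_count_grp]; exact hcnt)

-- ===== VERDICT (by name: the statement is the Claim_ definition above) =====
theorem remove_fully_overlapping_spec : Claim_equal_remove_fully_overlapping := by
  intro seqs _
  unfold Spec_remove_fully_overlapping remove_fully_overlapping remove_fully_overlapping_alt
  refine List.filter_congr ?_
  intro s _
  have h := (memA_iff_flag seqs s.1).trans (memB_iff_flag seqs s.1).symm
  simp only [pvItems] at h
  simpa using h
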